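-- pv_equiv track=rewrite | github.com/shivasinghshishodia/LeetCode | 2708-find-the-string-with-lcp/find-the-string-with-lcp.py | findTheString
-- ===== SOURCE A (Python) =====
-- def findTheString(lcp):
--     n = len(lcp)
--
--     for i in range(n):
--         if lcp[i][i] != n - i:
--             return ""
--
--     word = [''] * n
--     curr_char = 0
--
--     for i in range(n):
--         if word[i] == '':
--             if curr_char >= 26:
--                 return ""
--
--             ch = chr(ord('a') + curr_char)
--
--             for j in range(i, n):
--                 if lcp[i][j] > 0:
--                     word[j] = ch
--
--             curr_char += 1
--
--     dp = [[0]*(n+1) for _ in range(n+1)]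
--
--     for i in range(n-1, -1, -1):
--         for j in range(n-1, -1, -1):
--             if word[i] == word[j]:
--                 dp[i][j] = 1 + dp[i+1][j+1]
--
--     for i in range(n):
--         for j in range(n):
--             if dp[i][j] != lcp[i][j]:
--                 return ""
--
--     return "".join(word)
--     """
--     :type lcp: List[List[int]]
--     :rtype: str
--     """
-- ===== SOURCE B (Python) =====
-- def findTheString(lcp):
--     n = len(lcp)
--     if any(lcp[i][i] != n - i for i in range(n)):
--         return ""
--     # collect class leaders left to right; a position leads a new class
--     # unless an earlier leader is linked to it; stop at a 27th class
--     leaders = []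
--     for i in range(n):
--         if all(lcp[l][i] <= 0 for l in leaders):
--             if len(leaders) == 26:
--                 return ""
--             leaders.append(i)
--     # each position takes the letter of the last leader linked to it
--     word = []
--     for j in range(n):
--         ch = ''
--         for k, l in enumerate(leaders):
--             if l <= j and lcp[l][j] > 0:
--                 ch = chr(ord('a') + k)
--         word.append(ch)
--     dp = [[0] * (n + 1) for _ in range(n + 1)]
--     for i in range(n - 1, -1, -1):
--         for j in range(n - 1, -1, -1):
--             if word[i] == word[j]:
--                 dp[i][j] = 1 + dp[i + 1][j + 1]
--     for i in range(n):
--         for j in range(n):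
--             if dp[i][j] != lcp[i][j]:
--                 return ""
--     return "".join(word)
-- ===== Notes on version B (the rewrite author's own statement) =====
-- stated objective: alternative
-- what changed: The in-place greedy that marks word[j] from each fresh row is replaced by first collecting the list of class leaders (stopping at a 27th class) and then deriving each position's letter by a scan over the leaders; the diagonal check and the backward DP verification are kept.
-- outside the precondition, e.g. on findTheString([[3, 1, 0], [9, 2], [0, 0, 1]]): A returns '', B returns ''; on findTheString([[2, 5], [9]]): A raises IndexError, B raises IndexError
import Mathlib
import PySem

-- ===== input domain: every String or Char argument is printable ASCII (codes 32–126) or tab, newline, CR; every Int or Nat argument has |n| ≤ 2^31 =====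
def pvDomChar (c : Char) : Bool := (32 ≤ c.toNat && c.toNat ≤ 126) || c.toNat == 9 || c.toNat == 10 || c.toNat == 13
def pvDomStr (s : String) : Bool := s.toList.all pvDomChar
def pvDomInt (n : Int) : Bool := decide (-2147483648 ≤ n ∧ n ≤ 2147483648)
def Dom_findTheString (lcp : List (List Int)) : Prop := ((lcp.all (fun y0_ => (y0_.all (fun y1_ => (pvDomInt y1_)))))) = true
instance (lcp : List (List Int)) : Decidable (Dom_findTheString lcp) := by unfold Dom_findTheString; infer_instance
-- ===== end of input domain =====

-- B replaces A's in-place greedy marking of word[j] by collecting the list of class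
-- leaders first (stopping at a 27th class, as A does at its 27th fresh position) and
-- deriving each position's letter from a scan over the leaders; the diagonal check
-- and the backward DP verification are kept (objective: alternative).

-- ===== PORT A =====
-- lcp[i][j] for Nat indices; exact for in-range accesses (guaranteed by Pre_)
def pvIdx (lcp : List (List Int)) (i j : Nat) : Int := (lcp.getD i []).getD j 0

-- chr(ord('a') + k)
def pvCh (k : Nat) : String := String.mk [Char.ofNat (97 + k)]

-- the dp-build + compare phase, textually identical in Source A and Source B, so shared:
-- dp[i][j] = 1 + dp[i+1][j+1] when word[i]==word[j] (i,j descending), then compare with lcp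
def pvVerify (lcp : List (List Int)) (n : Nat) (word : List String) : Bool :=
  let dp := (List.range n).reverse.foldl (fun dp i =>
      (List.range n).reverse.foldl (fun dp j =>
        if word.getD i "" = word.getD j "" then
          dp.set i ((dp.getD i []).set j (1 + (dp.getD (i+1) []).getD (j+1) 0))
        else dp)
        dp)
    (List.replicate (n+1) (List.replicate (n+1) (0:Int)))
  (List.range n).all fun i => (List.range n).all fun j =>
    (dp.getD i []).getD j 0 == pvIdx lcp i j

-- inner marking loop of A: for j in range(i, n): if lcp[i][j] > 0: word[j] = ch
def pvMark (lcp : List (List Int)) (i : Nat) (ch : String) (js : List Nat) (w : List String) : List String :=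
  js.foldl (fun w j => if 0 < pvIdx lcp i j then w.set j ch else w) w

-- body of A's colouring loop (early return "" = none)
def pvAStep (lcp : List (List Int)) (n : Nat) (st : Option (List String × Nat)) (i : Nat) :
    Option (List String × Nat) :=
  match st with
  | none => none
  | some (word, curr) =>
    if word.getD i "" = "" then
      if 26 ≤ curr then none
      else some (pvMark lcp i (pvCh curr) (List.range' i (n - i)) word, curr + 1)
    else some (word, curr)

def findTheString (lcp : List (List Int)) : String :=
  let n := lcp.length
  if (List.range n).all (fun i => pvIdx lcp i i == (n : Int) - (i : Int)) then
    match (List.range n).foldl (pvAStep lcp n) (some (List.replicate n "", 0)) with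
    | none => ""
    | some (word, _) => if pvVerify lcp n word then PySem.Str.join "" word else ""
  else ""

-- ===== PORT B =====
-- leaders loop body: append i unless an earlier leader is linked to it;
-- none = B's early 'return ""' on finding a 27th class
def pvLStepC (lcp : List (List Int)) (st : Option (List Nat)) (i : Nat) : Option (List Nat) :=
  match st with
  | none => none
  | some ls =>
    if ls.all (fun l => decide (pvIdx lcp l i ≤ 0)) then
      if ls.length = 26 then none else some (ls ++ [i])
    else some ls

-- ch = ''; for k, l in enumerate(leaders): if l <= j and lcp[l][j] > 0: ch = chr(ord('a')+k)
def pvLetter (lcp : List (List Int)) (ls : List Nat) (j : Nat) : String :=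
  (ls.foldl (fun p l => ((if l ≤ j ∧ 0 < pvIdx lcp l j then pvCh p.2 else p.1), p.2 + 1)) ("", 0)).1

def findTheString_alt (lcp : List (List Int)) : String :=
  let n := lcp.length
  if (List.range n).any (fun i => !(pvIdx lcp i i == (n : Int) - (i : Int))) then ""
  else
    match (List.range n).foldl (pvLStepC lcp) (some []) with
    | none => ""
    | some leaders =>
      let word := (List.range n).foldl (fun w j => w ++ [pvLetter lcp leaders j]) []
      if pvVerify lcp n word then PySem.Str.join "" word else ""

-- ===== PRECONDITION & SPEC =====
-- Pre_ admits square-or-wider matrices (every row at least len(lcp) long) and, among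
-- ragged ones, those whose diagonal check fails before any short row is read (A and B
-- both return "" there); the remaining ragged inputs are excluded: on them A raises
-- IndexError, except for ragged corners the early returns reach first, where both A
-- and B return "" (Pre_ is narrower than its reason there; see the cite in claim.json).
def Pre_findTheString (lcp : List (List Int)) : Prop :=
  (∀ row ∈ lcp, lcp.length ≤ row.length) ∨
  (∃ i < lcp.length, (∀ k ≤ i, k < (lcp.getD k []).length) ∧
    (∀ k < i, (lcp.getD k []).getD k 0 = (lcp.length : Int) - (k : Int)) ∧
    (lcp.getD i []).getD i 0 ≠ (lcp.length : Int) - (i : Int))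
instance (lcp : List (List Int)) : Decidable (Pre_findTheString lcp) := by
  unfold Pre_findTheString; infer_instance

def pvWitness_findTheString : List (List Int) := [[2, 1], [1, 1]]

def Spec_findTheString (lcp : List (List Int)) (out : String) : Prop := out = findTheString_alt lcp
instance (lcp : List (List Int)) (out : String) : Decidable (Spec_findTheString lcp out) := by
  unfold Spec_findTheString; infer_instance

-- ===== CLAIM (what is proved, stated in full; the proofs are below) =====
def Claim_equal_findTheString : Prop :=
  ∀ (lcp : List (List Int)), Dom_findTheString lcp → Pre_findTheString lcp →
    Spec_findTheString lcp (findTheString lcp)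


-- ===== LEMMAS AND PROOFS =====

-- uncapped leaders fold, the proof-side reference both ports are related to
def pvLStep (lcp : List (List Int)) (ls : List Nat) (i : Nat) : List Nat :=
  if ls.all (fun l => decide (pvIdx lcp l i ≤ 0)) then ls ++ [i] else ls

def pvLeaders (lcp : List (List Int)) (n : Nat) : List Nat :=
  (List.range n).foldl (pvLStep lcp) []

-- proof-side description of A's colouring state after processing the leaders ls
def pvStateOf (lcp : List (List Int)) (n : Nat) (ls : List Nat) : Option (List String × Nat) :=
  if 27 ≤ ls.length then none
  else some ((List.range n).map (pvLetter lcp ls), ls.length)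

theorem pv_length_pvMark (lcp : List (List Int)) (i : Nat) (ch : String) :
    ∀ (js : List Nat) (w : List String), (pvMark lcp i ch js w).length = w.length := by
  intro js
  induction js with
  | nil => intro w; rfl
  | cons j rest ih =>
    intro w
    simp only [pvMark, List.foldl_cons] at *
    by_cases h : 0 < pvIdx lcp i j
    · rw [if_pos h, ih]; simp
    · rw [if_neg h, ih]

theorem pv_pvMark_getElem? (lcp : List (List Int)) (i : Nat) (ch : String) :
    ∀ (js : List Nat) (w : List String) (j : Nat), j < w.length →
      (pvMark lcp i ch js w)[j]? =
        if j ∈ js ∧ 0 < pvIdx lcp i j then some ch else w[j]? := by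
  intro js
  induction js with
  | nil => intro w j hj; simp [pvMark]
  | cons j' rest ih =>
    intro w j hj
    simp only [pvMark, List.foldl_cons] at *
    by_cases hp : 0 < pvIdx lcp i j'
    · rw [if_pos hp]
      rw [ih (w.set j' ch) j (by simpa using hj)]
      by_cases hjj : j = j'
      · subst hjj
        simp [hj, hp]
      · simp [Ne.symm hjj, hjj]
    · rw [if_neg hp]
      rw [ih w j hj]
      by_cases hjj : j = j'
      · subst hjj
        by_cases hm : j ∈ rest <;> simp [hm, hp]
      · by_cases hm : j ∈ rest <;> simp [hm, hjj]

theorem pv_letter_snd (lcp : List (List Int)) (j : Nat) :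
    ∀ (ls : List Nat) (p : String × Nat),
      (ls.foldl (fun p l => ((if l ≤ j ∧ 0 < pvIdx lcp l j then pvCh p.2 else p.1), p.2 + 1)) p).2
        = p.2 + ls.length := by
  intro ls
  induction ls with
  | nil => intro p; simp
  | cons l rest ih => intro p; simp [List.foldl_cons, ih]; omega

theorem pv_pvLetter_append (lcp : List (List Int)) (ls : List Nat) (a j : Nat) :
    pvLetter lcp (ls ++ [a]) j =
      if a ≤ j ∧ 0 < pvIdx lcp a j then pvCh ls.length else pvLetter lcp ls j := by
  unfold pvLetter
  rw [List.foldl_append]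
  simp only [List.foldl_cons, List.foldl_nil]
  rw [pv_letter_snd]
  simp

theorem pv_pvCh_ne_empty (k : Nat) : pvCh k ≠ "" := by
  intro h
  have h2 := congrArg String.toList h
  rw [pvCh, show String.mk [Char.ofNat (97 + k)] = String.ofList [Char.ofNat (97 + k)] from rfl,
    String.toList_ofList] at h2
  simp at h2

theorem pv_pvLetter_eq_empty_iff (lcp : List (List Int)) (j : Nat) :
    ∀ (ls : List Nat), pvLetter lcp ls j = "" ↔ ∀ l ∈ ls, ¬(l ≤ j ∧ 0 < pvIdx lcp l j) := by
  intro ls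
  induction ls using List.reverseRecOn with
  | nil => simp [pvLetter]
  | append_singleton rest a ih =>
    rw [pv_pvLetter_append]
    by_cases h : a ≤ j ∧ 0 < pvIdx lcp a j
    · simp [h, pv_pvCh_ne_empty]
      exact ⟨a, Or.inr rfl, h.1, h.2⟩
    · simp [h, ih]
      constructor
      · rintro hr l (hl | rfl) hlj
        · exact hr l hl hlj
        · have := (not_and.mp h) hlj
          omega
      · intro hr l hl hlj
        exact hr l (Or.inl hl) hlj

theorem pv_map_range_getD {α : Type} (f : Nat → α) (n a : Nat) (d : α) (h : a < n) :
    ((List.range n).map f).getD a d = f a := by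
  rw [List.getD_eq_getElem?_getD]
  simp [h]

theorem pv_pvLStep_le (lcp : List (List Int)) (ls : List Nat) (i : Nat) :
    ls.length ≤ (pvLStep lcp ls i).length := by
  unfold pvLStep; split <;> simp

theorem pv_foldl_pvLStep_le (lcp : List (List Int)) :
    ∀ (js : List Nat) (ls : List Nat), ls.length ≤ (js.foldl (pvLStep lcp) ls).length := by
  intro js
  induction js with
  | nil => intro ls; simp
  | cons j rest ih =>
    intro ls
    exact le_trans (pv_pvLStep_le lcp ls j) (ih (pvLStep lcp ls j))

theorem pv_pvLStep_lt (lcp : List (List Int)) {ls : List Nat} {i : Nat}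
    (h : ∀ l ∈ ls, l < i) : ∀ l ∈ pvLStep lcp ls i, l < i + 1 := by
  intro l hl
  unfold pvLStep at hl
  split at hl
  · rcases List.mem_append.1 hl with h1 | h1
    · exact Nat.lt_succ_of_lt (h l h1)
    · simp at h1; omega
  · exact Nat.lt_succ_of_lt (h l hl)

theorem pv_pvAStep_stateOf (lcp : List (List Int)) (a : Nat) (ls : List Nat)
    (ha : a < lcp.length) (hlt : ∀ l ∈ ls, l < a) :
    pvAStep lcp lcp.length (pvStateOf lcp lcp.length ls) a
      = pvStateOf lcp lcp.length (pvLStep lcp ls a) := by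
  by_cases h27 : 27 ≤ ls.length
  · have h27' : 27 ≤ (pvLStep lcp ls a).length := le_trans h27 (pv_pvLStep_le lcp ls a)
    simp [pvStateOf, h27, h27', pvAStep]
  · rw [pvStateOf, if_neg h27]
    have hget : (((List.range lcp.length).map (pvLetter lcp ls)).getD a "") = pvLetter lcp ls a :=
      pv_map_range_getD _ _ _ _ ha
    have hget' : (Option.map (pvLetter lcp ls) (List.range lcp.length)[a]?).getD "" = pvLetter lcp ls a := by
      simp [ha]
    have hfresh_iff : pvLetter lcp ls a = "" ↔
        (ls.all (fun l => decide (pvIdx lcp l a ≤ 0))) = true := by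
      rw [pv_pvLetter_eq_empty_iff]
      simp only [List.all_eq_true, decide_eq_true_eq]
      constructor
      · intro h l hl
        have := h l hl
        have hla : l ≤ a := Nat.le_of_lt (hlt l hl)
        omega
      · intro h l hl
        have := h l hl
        omega
    by_cases hfresh : pvLetter lcp ls a = ""
    · have hstep : pvLStep lcp ls a = ls ++ [a] := by
        unfold pvLStep; rw [if_pos (hfresh_iff.mp hfresh)]
      by_cases h26 : 26 ≤ ls.length
      · have : 27 ≤ (pvLStep lcp ls a).length := by rw [hstep]; simp; omega
        rw [pvStateOf, if_pos this]
        simp [pvAStep, hget', hfresh, h26]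
      · have hlen27 : ¬ 27 ≤ (ls ++ [a]).length := by simp; omega
        rw [hstep, pvStateOf, if_neg hlen27]
        simp only [pvAStep, hget, hfresh, if_neg h26, List.length_append,
          List.length_singleton]
        refine congrArg some (Prod.ext ?_ rfl)
        apply List.ext_getElem?
        intro j
        by_cases hj : j < lcp.length
        · have hwl : j < ((List.range lcp.length).map (pvLetter lcp ls)).length := by simpa using hj
          rw [pv_pvMark_getElem? lcp a (pvCh ls.length) _ _ j hwl]
          have hmem : j ∈ List.range' a (lcp.length - a) ↔ a ≤ j := by
            rw [List.mem_range'_1]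
            omega
          rw [List.getElem?_map, List.getElem?_map]
          simp only [List.getElem?_range, hj, Option.map_some]
          rw [pv_pvLetter_append]
          by_cases hc : a ≤ j ∧ 0 < pvIdx lcp a j
          · rw [if_pos ⟨hmem.mpr hc.1, hc.2⟩, if_pos hc]
          · rw [if_neg (by rw [hmem]; tauto), if_neg hc]
        · have h1 : (pvMark lcp a (pvCh ls.length) (List.range' a (lcp.length - a))
              ((List.range lcp.length).map (pvLetter lcp ls)))[j]? = none := by
            apply List.getElem?_eq_none
            rw [pv_length_pvMark]; simpa using Nat.le_of_not_lt hj
          have h2 : (((List.range lcp.length).map (pvLetter lcp (ls ++ [a]))))[j]? = none := by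
            apply List.getElem?_eq_none; simpa using Nat.le_of_not_lt hj
          rw [h1, h2]
    · have hstep : pvLStep lcp ls a = ls := by
        unfold pvLStep
        rw [if_neg (fun hc => hfresh (hfresh_iff.mpr hc))]
      rw [hstep, pvStateOf, if_neg h27]
      simp [pvAStep, hget', hfresh]

theorem pv_inv (lcp : List (List Int)) :
    ∀ (m a : Nat) (ls : List Nat), a + m = lcp.length → (∀ l ∈ ls, l < a) →
      (List.range' a m).foldl (pvAStep lcp lcp.length) (pvStateOf lcp lcp.length ls)
        = pvStateOf lcp lcp.length ((List.range' a m).foldl (pvLStep lcp) ls) := by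
  intro m
  induction m with
  | zero => intro a ls _ _; simp
  | succ m ih =>
    intro a ls hsum hlt
    rw [List.range'_succ]
    simp only [List.foldl_cons]
    rw [pv_pvAStep_stateOf lcp a ls (by omega) hlt]
    exact ih (a+1) (pvLStep lcp ls a) (by omega) (pv_pvLStep_lt lcp hlt)

theorem pv_foldl_pvLStepC_none (lcp : List (List Int)) :
    ∀ (js : List Nat), js.foldl (pvLStepC lcp) none = none := by
  intro js
  induction js with
  | nil => rfl
  | cons j rest ih => simpa [List.foldl_cons, pvLStepC] using ih

-- relate B's capped leaders fold to the uncapped reference fold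
theorem pv_capped_eq (lcp : List (List Int)) :
    ∀ (js : List Nat) (ls : List Nat), ls.length ≤ 26 →
      js.foldl (pvLStepC lcp) (some ls)
        = if 27 ≤ (js.foldl (pvLStep lcp) ls).length then none
          else some (js.foldl (pvLStep lcp) ls) := by
  intro js
  induction js with
  | nil => intro ls h; simp; omega
  | cons j rest ih =>
    intro ls h
    simp only [List.foldl_cons]
    by_cases hfresh : (ls.all (fun l => decide (pvIdx lcp l j ≤ 0))) = true
    · have hstep : pvLStep lcp ls j = ls ++ [j] := by unfold pvLStep; rw [if_pos hfresh]
      by_cases h26 : ls.length = 26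
      · have hcap : pvLStepC lcp (some ls) j = none := by
          simp [pvLStepC, hfresh, h26]
        rw [hcap, pv_foldl_pvLStepC_none, hstep]
        have : 27 ≤ (rest.foldl (pvLStep lcp) (ls ++ [j])).length := by
          have := pv_foldl_pvLStep_le lcp rest (ls ++ [j])
          simp at this; omega
        rw [if_pos this]
      · have hcap : pvLStepC lcp (some ls) j = some (ls ++ [j]) := by
          simp [pvLStepC, hfresh, h26]
        rw [hcap, hstep, ih (ls ++ [j]) (by simp; omega)]
    · have hstep : pvLStep lcp ls j = ls := by unfold pvLStep; rw [if_neg hfresh]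
      have hcap : pvLStepC lcp (some ls) j = some ls := by
        simp [pvLStepC, hfresh]
      rw [hcap, hstep, ih ls h]

theorem pv_foldl_concat_eq_map {α β : Type} (f : α → β) :
    ∀ (l : List α) (init : List β),
      l.foldl (fun w j => w ++ [f j]) init = init ++ l.map f := by
  intro l
  induction l with
  | nil => intro init; simp
  | cons x rest ih => intro init; simp [List.foldl_cons, ih]

theorem pv_stateOf_nil (lcp : List (List Int)) (n : Nat) :
    pvStateOf lcp n [] = some (List.replicate n "", 0) := by
  simp only [pvStateOf, List.length_nil]
  rw [if_neg (by omega)]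
  have he : List.map (pvLetter lcp []) (List.range n) = List.map (fun _ => "") (List.range n) :=
    List.map_congr_left (fun j _ => rfl)
  rw [he, List.map_const']
  simp

-- ===== VERDICT (by name: the statement is the Claim_ definition above) =====
theorem findTheString_spec : Claim_equal_findTheString := by
  intro lcp _ _
  simp only [Spec_findTheString, findTheString, findTheString_alt]
  by_cases hall : ((List.range lcp.length).all fun i => pvIdx lcp i i == (lcp.length : Int) - (i : Int)) = true
  · have hany : ((List.range lcp.length).any fun i => !(pvIdx lcp i i == (lcp.length : Int) - (i : Int))) = false := by
      simp only [List.all_eq_true] at hall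
      simp only [List.any_eq_false, Bool.not_eq_true']
      intro i hi; simp [hall i hi]
    rw [hall, hany]
    simp only [if_true, Bool.false_eq_true, if_false]
    rw [List.range_eq_range', ← pv_stateOf_nil lcp lcp.length,
      pv_inv lcp lcp.length 0 [] (by omega) (by simp)]
    rw [← List.range_eq_range']
    rw [pv_capped_eq lcp (List.range lcp.length) [] (by simp)]
    show (match pvStateOf lcp lcp.length (pvLeaders lcp lcp.length) with
      | none => ""
      | some (word, _) => if pvVerify lcp lcp.length word then PySem.Str.join "" word else "") = _
    by_cases h27 : 27 ≤ (pvLeaders lcp lcp.length).length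
    · rw [pvStateOf, if_pos h27]
      rw [show (List.range lcp.length).foldl (pvLStep lcp) [] = pvLeaders lcp lcp.length from rfl,
        if_pos h27]
    · rw [pvStateOf, if_neg h27]
      rw [show (List.range lcp.length).foldl (pvLStep lcp) [] = pvLeaders lcp lcp.length from rfl,
        if_neg h27]
      show _ = (if pvVerify lcp lcp.length
          ((List.range lcp.length).foldl (fun w j => w ++ [pvLetter lcp (pvLeaders lcp lcp.length) j]) [])
        then PySem.Str.join "" _ else "")
      rw [pv_foldl_concat_eq_map (pvLetter lcp (pvLeaders lcp lcp.length)) (List.range lcp.length) []]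
      simp only [List.nil_append]
  · have hany : ((List.range lcp.length).any fun i => !(pvIdx lcp i i == (lcp.length : Int) - (i : Int))) = true := by
      simp only [List.all_eq_true, not_forall] at hall
      rw [List.any_eq_true]
      obtain ⟨i, hi, hne⟩ := hall
      exact ⟨i, hi, by simp [hne]⟩
    rw [hany]
    simp only [if_true]
    rw [if_neg (by simpa using hall)]
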